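-- pv_equiv track=rewrite | github.com/reggie-o7/TIP-102 | TIP Unit 2 Problems.py | is_authentic_collection
-- ===== SOURCE A (Python) =====
-- def is_authentic_collection(art_pieces):
--     freq = {}
--     for i in art_pieces:
--         freq[i] = freq.get(i,0) + 1
--
--     max_key = max(freq)
--
--     if len(art_pieces) != max_key+1:
--         return False
--
--     for i in range(1,max_key):
--         if freq.get(i,0) != 1:
--             return False
--
--     if freq.get(max_key, 0) != 2:
--         return False
--
--     return True
-- ===== SOURCE B (Python) =====
-- def is_authentic_collection(art_pieces):
--     m = max(art_pieces)
--     if len(art_pieces) != m + 1: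
--         return False
--     return m >= 1 and sorted(art_pieces) == list(range(1, m)) + [m, m]
-- ===== Notes on version B (the rewrite author's own statement) =====
-- stated objective: simpler
-- what changed: Replaces the frequency-dict counting plus range scan (after a length check) with a single sort compared against the literal authentic pattern [1..m-1, m, m].
import Mathlib
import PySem

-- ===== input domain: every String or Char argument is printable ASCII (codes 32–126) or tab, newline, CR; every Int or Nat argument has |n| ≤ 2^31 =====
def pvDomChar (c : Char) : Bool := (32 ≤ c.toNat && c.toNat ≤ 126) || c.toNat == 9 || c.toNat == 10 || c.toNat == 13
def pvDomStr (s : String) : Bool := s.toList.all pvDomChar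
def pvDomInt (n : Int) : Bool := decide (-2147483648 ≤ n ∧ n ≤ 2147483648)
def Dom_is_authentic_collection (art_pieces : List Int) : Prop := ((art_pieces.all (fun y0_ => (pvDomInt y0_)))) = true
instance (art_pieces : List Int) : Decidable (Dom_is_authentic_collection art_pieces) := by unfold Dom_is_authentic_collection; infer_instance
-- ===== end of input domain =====

-- B replaces A's frequency-dict counting and range scan with a sort compared against the literal pattern [1..m-1, m, m] (simpler).


-- ===== PORT A =====
def is_authentic_collection (art_pieces : List Int) : Bool :=
  let freq : PySem.Dict Int Int :=
    art_pieces.foldl (fun d i => d.insert i (d.getD i 0 + 1)) PySem.Dict.empty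
  match PySem.List.max? freq.keys (fun x => x) with
  | none => false  -- Python's max({}) raises ValueError here; excluded by Pre_
  | some max_key =>
    if (art_pieces.length : Int) ≠ max_key + 1 then false
    else if (PySem.List.pyRange 1 max_key 1).any (fun i => freq.getD i 0 != 1) then false
    else if freq.getD max_key 0 != 2 then false
    else true

-- ===== PORT B =====
def is_authentic_collection_alt (art_pieces : List Int) : Bool :=
  match PySem.List.max? art_pieces (fun x => x) with
  | none => false  -- Python's max([]) raises ValueError here; excluded by Pre_
  | some m =>
    if (art_pieces.length : Int) ≠ m + 1 then false
    else decide (m ≥ 1) &&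
      (PySem.List.sorted art_pieces (fun x => x) false == PySem.List.pyRange 1 m 1 ++ [m, m])

-- ===== PRECONDITION & SPEC =====
-- Pre_ excludes only the empty list, on which both Pythons raise ValueError (max of an empty sequence).
def Pre_is_authentic_collection (art_pieces : List Int) : Prop := art_pieces ≠ []
instance (art_pieces : List Int) : Decidable (Pre_is_authentic_collection art_pieces) := by unfold Pre_is_authentic_collection; infer_instance

def pvWitness_is_authentic_collection : List Int := [1, 2, 3, 3]

def Spec_is_authentic_collection (art_pieces : List Int) (out : Bool) : Prop := out = is_authentic_collection_alt art_pieces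
instance (art_pieces : List Int) (out : Bool) : Decidable (Spec_is_authentic_collection art_pieces out) := by unfold Spec_is_authentic_collection; infer_instance

-- ===== CLAIM (what is proved, stated in full; the proofs are below) =====
def Claim_equal_is_authentic_collection : Prop := ∀ (art_pieces : List Int), Dom_is_authentic_collection art_pieces → Pre_is_authentic_collection art_pieces → Spec_is_authentic_collection art_pieces (is_authentic_collection art_pieces)

-- ===== LEMMAS AND PROOFS =====

-- max over a list and over its set of distinct elements agree (the maximum value depends only on membership).
theorem max_ofList_eq (l : List Int) :
    PySem.List.max? (PySem.Set.ofList l) (fun x => x) = PySem.List.max? l (fun x => x) := by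
  cases hl : PySem.List.max? l (fun x => x) with
  | none =>
    rw [PySem.List.max?_eq_none_iff] at hl
    subst hl
    rfl
  | some m =>
    cases hs : PySem.List.max? (PySem.Set.ofList l) (fun x => x) with
    | none =>
      rw [PySem.List.max?_eq_none_iff] at hs
      have h2 : m ∈ PySem.Set.ofList l := by
        simpa [PySem.Set.mem_ofList] using PySem.List.max?_mem hl
      simp [hs] at h2
    | some m' =>
      have h1 : m' ∈ l := by
        simpa [PySem.Set.mem_ofList] using PySem.List.max?_mem hs
      have h2 : m ∈ PySem.Set.ofList l := by
        simpa [PySem.Set.mem_ofList] using PySem.List.max?_mem hl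
      have hle1 := PySem.List.max?_isMax hl m' h1
      have hle2 := PySem.List.max?_isMax hs m h2
      have : m = m' := le_antisymm hle2 hle1
      rw [this]

-- A returns True exactly when: length = m+1, each of 1..m-1 occurs once, and m occurs twice.
theorem A_iff (l : List Int) (m : Int)
    (hk : PySem.List.max? (PySem.Set.ofList l) (fun x => x) = some m) :
    is_authentic_collection l = true ↔
      ((l.length : Int) = m + 1 ∧ (∀ i, 1 ≤ i → i < m → (l.count i : Int) = 1) ∧
        (l.count m : Int) = 2) := by
  have hc : l.foldl (fun d i => d.insert i (d.getD i 0 + 1)) PySem.Dict.empty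
      = PySem.Dict.counter l := PySem.Dict.foldl_insert_getD_add_one_eq_counter l
  simp only [is_authentic_collection, hc, PySem.Dict.keys_counter, hk,
    PySem.Dict.getD_counter]
  constructor
  · intro h
    have h1 : (l.length : Int) = m + 1 := by
      by_contra hx
      rw [if_pos hx] at h; simp at h
    rw [if_neg (by omega : ¬ ((l.length : Int) ≠ m + 1))] at h
    have h2 : ¬ ((PySem.List.pyRange 1 m 1).any fun i => ((l.count i : Int)) != 1) = true := by
      intro hx
      rw [if_pos hx] at h; simp at h
    rw [if_neg h2] at h
    have h3 : (l.count m : Int) = 2 := by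
      by_contra hx
      rw [if_pos (by simpa using hx)] at h; simp at h
    refine ⟨h1, ?_, h3⟩
    intro i h1i him
    by_contra hne
    exact h2 (by
        simp only [List.any_eq_true]
        exact ⟨i, by simp [PySem.List.mem_pyRange_one, h1i, him], by simpa using hne⟩)
  · rintro ⟨hlen, hone, htwo⟩
    rw [if_neg (by omega), if_neg, if_neg (by simp [htwo])]
    simp only [List.any_eq_true, not_exists]
    push Not
    intro i hi
    rw [PySem.List.mem_pyRange_one] at hi
    simp [hone i hi.1 hi.2]

-- B returns True exactly when m ≥ 1 and sorting yields the pattern [1..m-1, m, m].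
theorem B_iff (l : List Int) (m : Int)
    (hm : PySem.List.max? l (fun x => x) = some m) :
    is_authentic_collection_alt l = true ↔
      ((l.length : Int) = m + 1 ∧ 1 ≤ m ∧
        PySem.List.sorted l (fun x => x) false = PySem.List.pyRange 1 m 1 ++ [m, m]) := by
  rcases eq_or_ne (l.length : Int) (m + 1) with h | h
  · simp [is_authentic_collection_alt, hm, h, ge_iff_le]
  · simp only [is_authentic_collection_alt, hm, if_pos h]
    simp [h]

theorem count_pair (x m : Int) : List.count x [m, m] = if x = m then 2 else 0 := by
  rcases eq_or_ne x m with h | h <;> simp [h, eq_comm]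

theorem count_range (x m : Int) :
    List.count x (PySem.List.pyRange 1 m 1) = if 1 ≤ x ∧ x < m then 1 else 0 := by
  split_ifs with h
  · exact List.count_eq_one_of_mem (PySem.List.nodup_pyRange_one 1 m)
      ((PySem.List.mem_pyRange_one).mpr h)
  · exact List.count_eq_zero_of_not_mem (fun hx => h ((PySem.List.mem_pyRange_one).mp hx))

-- A's multiset conditions are equivalent to B's sorted-pattern equation.
theorem main_iff (l : List Int) (m : Int) :
    ((l.length : Int) = m + 1 ∧ (∀ i, 1 ≤ i → i < m → (l.count i : Int) = 1) ∧
      (l.count m : Int) = 2) ↔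
    ((l.length : Int) = m + 1 ∧ 1 ≤ m ∧
      PySem.List.sorted l (fun x => x) false = PySem.List.pyRange 1 m 1 ++ [m, m]) := by
  have hlenr : (PySem.List.pyRange 1 m 1).length = (m - 1).toNat :=
    PySem.List.length_pyRange_one 1 m
  constructor
  · rintro ⟨hlen, hone, htwo⟩
    have h2 : l.count m = 2 := by exact_mod_cast htwo
    have hcl : l.count m ≤ l.length := List.count_le_length
    have hm1 : 1 ≤ m := by omega
    refine ⟨hlen, hm1, ?_⟩
    have hsub : List.Subperm (PySem.List.pyRange 1 m 1 ++ [m, m]) l := by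
      rw [List.subperm_ext_iff]
      intro x hx
      rw [List.count_append, count_pair, count_range]
      rcases List.mem_append.mp hx with hx | hx
      · have hx' := (PySem.List.mem_pyRange_one).mp hx
        have : l.count x = 1 := by exact_mod_cast hone x hx'.1 hx'.2
        rw [if_pos hx', if_neg (by omega), this]
      · have hx' : x = m := by simpa using hx
        subst hx'
        rw [if_neg (by omega), if_pos rfl, h2]
    have hlen2 : l.length ≤ (PySem.List.pyRange 1 m 1 ++ [m, m]).length := by
      rw [List.length_append, hlenr]
      simp only [List.length_cons, List.length_nil]
      omega
    have hperm := hsub.perm_of_length_le hlen2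
    exact (PySem.List.sorted_id_eq_of_perm_of_pairwise _ _ hperm (by
      rw [List.pairwise_append]
      refine ⟨(PySem.List.pairwise_lt_pyRange_one 1 m).imp le_of_lt, by simp, ?_⟩
      intro a ha b hb
      have := (PySem.List.mem_pyRange_one).mp ha
      have hb' : b = m := by simpa using hb
      omega))
  · rintro ⟨hlen0, hm1, hs⟩
    have hperm : (PySem.List.pyRange 1 m 1 ++ [m, m]).Perm l := by
      rw [← hs]; exact PySem.List.sorted_perm l (fun x => x) false
    have hlen := hperm.length_eq
    rw [List.length_append, hlenr] at hlen
    simp only [List.length_cons, List.length_nil] at hlen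
    have hcount := fun x => hperm.count_eq x
    refine ⟨by omega, ?_, ?_⟩
    · intro i h1i him
      have := hcount i
      rw [List.count_append, count_pair, count_range, if_pos ⟨h1i, him⟩,
        if_neg (by omega)] at this
      omega
    · have := hcount m
      rw [List.count_append, count_pair, count_range, if_neg (by omega), if_pos rfl] at this
      omega

-- ===== VERDICT (by name: the statement is the Claim_ definition above) =====
theorem is_authentic_collection_spec : Claim_equal_is_authentic_collection := by
  intro l _ hpre
  unfold Spec_is_authentic_collection
  cases hm : PySem.List.max? l (fun x => x) with
  | none =>
    exact absurd ((PySem.List.max?_eq_none_iff _ _).mp hm) hpre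
  | some m =>
    have hk : PySem.List.max? (PySem.Set.ofList l) (fun x => x) = some m := by
      rw [max_ofList_eq, hm]
    rw [Bool.eq_iff_iff, A_iff l m hk, B_iff l m hm]
    exact main_iff l m
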